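-- pv_equiv track=rewrite | github.com/cbdmatze/break_the_substitution_cipher | previous_attempts/break_substitution_trigram_adjust_weight_digraph_trigram.py | evaluate_decryption
-- ===== SOURCE A (Python) =====
-- from collections import Counter
--
-- def frequency_analysis(text):
--     letters_only = [char.lower() for char in text if char.isalpha()]
--     return Counter(letters_only)
--
-- def digraph_analysis(text):
--     digraphs = [text[i:i+2] for i in range(len(text) - 1) if text[i:i+2].isalpha()]
--     return Counter(digraphs)
--
-- def trigram_analysis(text):
--     trigrams = [text[i:i+3] for i in range(len(text) - 2) if text[i:i+3].isalpha()]
--     return Counter(trigrams)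
--
-- def evaluate_decryption(decrypted_text, digraph_weight=2, trigram_weight=3):
--     score = 0
--
--     # Analyze letter frequency, digraphs, and trigrams
--     letter_freq = frequency_analysis(decrypted_text)
--     digraphs = digraph_analysis(decrypted_text)
--     trigrams = trigram_analysis(decrypted_text)
--
--     # Known common English digraphs and trigrams
--     common_digraphs = ['th', 'he', 'in', 'er', 'an', 're', 'on', 'at', 'en', 'nd', 'ti', 'es', 'or', 'te', 'of']
--     common_trigrams = ['the', 'and', 'ing', 'ent', 'ion', 'her', 'for', 'tha', 'nth', 'int', 'ere', 'tio', 'ter']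
--
--     # Reward matches for common digraphs
--     for digraph in common_digraphs:
--         score += digraphs[digraph] * digraph_weight  # Adjustable weight for digraphs
--
--     # Reward matches for common trigrams
--     for trigram in common_trigrams:
--         score += trigrams[trigram] * trigram_weight  # Adjustable weight for trigrams
--
--     return score
-- ===== SOURCE B (Python) =====
-- COMMON_DIGRAPHS = frozenset(['th', 'he', 'in', 'er', 'an', 're', 'on', 'at', 'en',
--                              'nd', 'ti', 'es', 'or', 'te', 'of'])
-- COMMON_TRIGRAMS = frozenset(['the', 'and', 'ing', 'ent', 'ion', 'her', 'for',
--                              'tha', 'nth', 'int', 'ere', 'tio', 'ter'])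
--
-- def evaluate_decryption(decrypted_text, digraph_weight=2, trigram_weight=3):
--     # One scoring scan: no frequency tables, no Counter indexing.
--     score = 0
--     for i in range(len(decrypted_text)):
--         if decrypted_text[i:i+2] in COMMON_DIGRAPHS:
--             score += digraph_weight
--         if decrypted_text[i:i+3] in COMMON_TRIGRAMS:
--             score += trigram_weight
--     return score
-- ===== Notes on version B (the rewrite author's own statement) =====
-- stated objective: simpler
-- what changed: Replaces the three Counter tables (including the unused letter-frequency one) and the per-n-gram table lookups by a single scoring scan over positions that tests each window against two frozensets.
import Mathlib
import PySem

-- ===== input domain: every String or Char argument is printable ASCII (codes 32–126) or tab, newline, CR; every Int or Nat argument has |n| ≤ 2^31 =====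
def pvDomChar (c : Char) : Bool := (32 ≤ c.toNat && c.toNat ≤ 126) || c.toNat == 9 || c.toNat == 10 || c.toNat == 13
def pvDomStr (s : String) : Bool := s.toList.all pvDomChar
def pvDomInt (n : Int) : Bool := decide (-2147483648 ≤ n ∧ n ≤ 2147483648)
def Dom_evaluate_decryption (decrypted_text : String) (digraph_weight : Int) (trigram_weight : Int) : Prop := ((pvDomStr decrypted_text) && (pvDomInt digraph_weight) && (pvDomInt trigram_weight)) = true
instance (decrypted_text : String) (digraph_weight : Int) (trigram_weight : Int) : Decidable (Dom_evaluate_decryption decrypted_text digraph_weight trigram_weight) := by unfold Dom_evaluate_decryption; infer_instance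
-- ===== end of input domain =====

-- B replaces A's three Counter tables (one of them unused) and their per-n-gram lookups
-- by a single scoring scan that tests each window against two fixed sets (objective: simpler).

-- ===== PORT A =====
-- the two literal tables of A (shared literals; A reads them as lists, B builds sets from them)
def commonDigraphs : List (List Char) :=
  [['t','h'],['h','e'],['i','n'],['e','r'],['a','n'],['r','e'],['o','n'],['a','t'],
   ['e','n'],['n','d'],['t','i'],['e','s'],['o','r'],['t','e'],['o','f']]
def commonTrigrams : List (List Char) :=
  [['t','h','e'],['a','n','d'],['i','n','g'],['e','n','t'],['i','o','n'],['h','e','r'],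
   ['f','o','r'],['t','h','a'],['n','t','h'],['i','n','t'],['e','r','e'],['t','i','o'],['t','e','r']]

def frequency_analysis (text : List Char) : PySem.Dict Char Int :=
  PySem.Dict.counter ((text.filter (fun c => PySem.Chars.isalpha c)).map PySem.Chars.lowerChar)

def digraph_analysis (text : List Char) : PySem.Dict (List Char) Int :=
  PySem.Dict.counter
    (((PySem.List.pyRange 0 ((text.length : Int) - 1) 1).map
        (fun i => PySem.List.slice text (some i) (some (i + 2)))).filter
      (fun g => PySem.Chars.strIsalpha g))

def trigram_analysis (text : List Char) : PySem.Dict (List Char) Int :=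
  PySem.Dict.counter
    (((PySem.List.pyRange 0 ((text.length : Int) - 2) 1).map
        (fun i => PySem.List.slice text (some i) (some (i + 3)))).filter
      (fun g => PySem.Chars.strIsalpha g))

def evaluate_decryption (decrypted_text : String) (digraph_weight : Int) (trigram_weight : Int) : Int :=
  let text := decrypted_text.toList
  let score : Int := 0
  let _letter_freq := frequency_analysis text   -- computed and never read, as in A
  let digraphs := digraph_analysis text
  let trigrams := trigram_analysis text
  let score := commonDigraphs.foldl (fun s d => s + digraphs.getD d 0 * digraph_weight) score
  let score := commonTrigrams.foldl (fun s g => s + trigrams.getD g 0 * trigram_weight) score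
  score

-- ===== PORT B =====
def commonDigraphSet : PySem.Set (List Char) := PySem.Set.ofList commonDigraphs
def commonTrigramSet : PySem.Set (List Char) := PySem.Set.ofList commonTrigrams

def evaluate_decryption_alt (decrypted_text : String) (digraph_weight : Int) (trigram_weight : Int) : Int :=
  let text := decrypted_text.toList
  (PySem.List.pyRange 0 (text.length : Int) 1).foldl
    (fun score i =>
      let score := if PySem.Set.contains commonDigraphSet (PySem.List.slice text (some i) (some (i + 2)))
                   then score + digraph_weight else score
      if PySem.Set.contains commonTrigramSet (PySem.List.slice text (some i) (some (i + 3)))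
      then score + trigram_weight else score)
    0

-- ===== PRECONDITION & SPEC =====
def Spec_evaluate_decryption (decrypted_text : String) (digraph_weight : Int) (trigram_weight : Int) (out : Int) : Prop := out = evaluate_decryption_alt decrypted_text digraph_weight trigram_weight
instance (decrypted_text : String) (digraph_weight : Int) (trigram_weight : Int) (out : Int) : Decidable (Spec_evaluate_decryption decrypted_text digraph_weight trigram_weight out) := by unfold Spec_evaluate_decryption; infer_instance

-- ===== CLAIM (what is proved, stated in full; the proofs are below) =====
def Claim_equal_evaluate_decryption : Prop := ∀ (decrypted_text : String) (digraph_weight : Int) (trigram_weight : Int), Dom_evaluate_decryption decrypted_text digraph_weight trigram_weight → Spec_evaluate_decryption decrypted_text digraph_weight trigram_weight (evaluate_decryption decrypted_text digraph_weight trigram_weight)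

-- ===== LEMMAS AND PROOFS =====

-- the position-count of windows of width m that hit the table C
def hitCount (L : List Char) (C : List (List Char)) (m : Int) : Int :=
  ((PySem.List.pyRange 0 (L.length : Int) 1).countP
    (fun i => decide (PySem.List.slice L (some i) (some (i + m)) ∈ C)) : Int)

-- countP of a disjunction of disjoint predicates splits
theorem countP_or_of_disjoint {α : Type} (D : List α) (p q : α → Bool)
    (h : ∀ x, ¬(p x = true ∧ q x = true)) :
    D.countP (fun x => p x || q x) = D.countP p + D.countP q := by
  induction D with
  | nil => simp
  | cons x D ih =>
    simp only [List.countP_cons, ih]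
    cases hp : p x <;> cases hq : q x <;> simp_all <;> omega

-- summed multiplicities over a duplicate-free candidate list = one filtered count
theorem sum_count_eq_countP (C D : List (List Char)) (h : C.Nodup) :
    (C.map (fun d => (D.count d : Int))).sum = (D.countP (fun x => decide (x ∈ C)) : Int) := by
  induction C with
  | nil => simp
  | cons c C ih =>
    have hc : c ∉ C := (List.nodup_cons.mp h).1
    have hC : C.Nodup := (List.nodup_cons.mp h).2
    have hsplit : D.countP (fun x => decide (x ∈ c :: C))
        = D.countP (· == c) + D.countP (fun x => decide (x ∈ C)) := by
      have he : (fun x : List Char => decide (x ∈ c :: C))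
          = (fun x : List Char => (x == c) || decide (x ∈ C)) := by
        funext x; by_cases hx : x = c <;> simp [hx, List.mem_cons]
      rw [he]
      exact countP_or_of_disjoint D _ _ (by
        intro x ⟨h1, h2⟩
        exact hc ((beq_iff_eq.mp h1) ▸ (of_decide_eq_true h2)))
    rw [List.map_cons, List.sum_cons, ih hC, hsplit, List.count_eq_countP]
    push_cast
    ring

-- a sum of weighted indicators is weight times a count
theorem sum_map_ite_w (xs : List Int) (p : Int → Bool) (w : Int) :
    (xs.map (fun i => if p i then w else 0)).sum = w * (xs.countP p : Int) := by
  induction xs with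
  | nil => simp
  | cons x xs ih =>
    simp only [List.map_cons, List.sum_cons, List.countP_cons, ih]
    cases hp : p x
    · simp
    · simp only [if_true]
      push_cast
      ring

-- extending the scanned range by positions where the predicate is false does not change the count
theorem countP_pyRange_extend (n : Nat) (b : Int) (hb : b ≤ (n : Int)) (p : Int → Bool)
    (hp : ∀ i : Int, 0 ≤ i → b ≤ i → p i = false) :
    (PySem.List.pyRange 0 b 1).countP p = (PySem.List.pyRange 0 (n : Int) 1).countP p := by
  by_cases h : b ≤ 0
  · rw [PySem.List.pyRange_one_eq_nil h]
    simp only [List.countP_nil]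
    symm
    rw [List.countP_eq_zero]
    intro i hi
    have hm := (PySem.List.mem_pyRange_one).mp hi
    simp [hp i hm.1 (by omega)]
  · rw [PySem.List.pyRange_one_append 0 b (n : Int) (by omega) hb, List.countP_append]
    have hz : (PySem.List.pyRange b (n : Int) 1).countP p = 0 := by
      rw [List.countP_eq_zero]
      intro i hi
      have hm := (PySem.List.mem_pyRange_one).mp hi
      simp [hp i (by omega) hm.1]
    omega

-- a window shorter than its nominal size matches no table entry
theorem short_slice_not_mem (L : List Char) (C : List (List Char)) (i : Int) (m : Nat)
    (hm : 1 ≤ m) (hlen : ∀ d ∈ C, d.length = m) (hi : 0 ≤ i) (hshort : (L.length : Int) < i + (m : Int)) :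
    decide (PySem.List.slice L (some i) (some (i + (m : Int))) ∈ C) = false := by
  rw [decide_eq_false_iff_not]
  intro hmem
  have hl := hlen _ hmem
  lift i to Nat using hi
  rw [show ((i : Int) + (m : Int)) = ((i + m : Nat) : Int) by push_cast; ring,
      PySem.List.slice_natCast] at hl
  simp only [List.length_take, List.length_drop] at hl
  have hshort' : L.length < i + m := by exact_mod_cast hshort
  omega

-- every table entry is alphabetic and of the nominal length (closed computations)
theorem commonDigraphs_facts : commonDigraphs.Nodup ∧
    (∀ d ∈ commonDigraphs, PySem.Chars.strIsalpha d = true ∧ d.length = 2) := by decide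
theorem commonTrigrams_facts : commonTrigrams.Nodup ∧
    (∀ d ∈ commonTrigrams, PySem.Chars.strIsalpha d = true ∧ d.length = 3) := by decide

-- A's summed table lookups over one table = weight times the window hit-count of the full scan
theorem a_side (L : List Char) (C : List (List Char)) (m : Nat) (hm : 1 ≤ m)
    (hnd : C.Nodup)
    (hfacts : ∀ d ∈ C, PySem.Chars.strIsalpha d = true ∧ d.length = m)
    (w init : Int) :
    (C.foldl (fun s d =>
        s + (PySem.Dict.counter
              (((PySem.List.pyRange 0 ((L.length : Int) + 1 - (m : Int)) 1).map
                  (fun i => PySem.List.slice L (some i) (some (i + (m : Int))))).filter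
                (fun g => PySem.Chars.strIsalpha g))).getD d 0 * w) init)
      = init + w * hitCount L C (m : Int) := by
  rw [PySem.List.foldl_add]
  congr 1
  simp only [PySem.Dict.getD_counter]
  rw [List.sum_map_mul_right, sum_count_eq_countP _ _ hnd, List.countP_filter, List.countP_map]
  simp only [Function.comp_def]
  have hpred : (fun i : Int => decide (PySem.List.slice L (some i) (some (i + (m : Int))) ∈ C)
        && PySem.Chars.strIsalpha (PySem.List.slice L (some i) (some (i + (m : Int)))))
      = (fun i : Int => decide (PySem.List.slice L (some i) (some (i + (m : Int))) ∈ C)) := by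
    funext i
    by_cases hmem : PySem.List.slice L (some i) (some (i + (m : Int))) ∈ C
    · simp [hmem, (hfacts _ hmem).1]
    · simp [hmem]
  rw [hpred, countP_pyRange_extend L.length ((L.length : Int) + 1 - (m : Int)) (by omega) _
      (fun i h0 hb => short_slice_not_mem L C i m hm (fun d hd => (hfacts d hd).2) h0 (by omega))]
  unfold hitCount
  ring

-- A computes weight-times-hit-count for each table
theorem a_eq (t : String) (dw tw : Int) :
    evaluate_decryption t dw tw
      = dw * hitCount t.toList commonDigraphs 2 + tw * hitCount t.toList commonTrigrams 3 := by
  have h2 := a_side t.toList commonDigraphs 2 (by norm_num) commonDigraphs_facts.1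
    commonDigraphs_facts.2 dw 0
  have h3 := a_side t.toList commonTrigrams 3 (by norm_num) commonTrigrams_facts.1
    commonTrigrams_facts.2 tw (0 + dw * hitCount t.toList commonDigraphs 2)
  simp only [Nat.cast_ofNat] at h2 h3
  simp only [evaluate_decryption, digraph_analysis, trigram_analysis]
  rw [show ((t.toList.length : Int) - 1) = (t.toList.length : Int) + 1 - 2 by ring,
      show ((t.toList.length : Int) - 2) = (t.toList.length : Int) + 1 - 3 by ring,
      h2, h3]
  ring

-- membership in B's sets is membership in A's literal tables
theorem contains_dig (x : List Char) :
    PySem.Set.contains commonDigraphSet x = decide (x ∈ commonDigraphs) := by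
  by_cases hx : x ∈ commonDigraphs
  · simp [commonDigraphSet, PySem.Set.contains, PySem.Set.mem_ofList, hx]
  · simp [commonDigraphSet, PySem.Set.contains, PySem.Set.mem_ofList, hx]

theorem contains_tri (x : List Char) :
    PySem.Set.contains commonTrigramSet x = decide (x ∈ commonTrigrams) := by
  by_cases hx : x ∈ commonTrigrams
  · simp [commonTrigramSet, PySem.Set.contains, PySem.Set.mem_ofList, hx]
  · simp [commonTrigramSet, PySem.Set.contains, PySem.Set.mem_ofList, hx]

-- B's scan computes the same weighted hit-counts
theorem b_eq (t : String) (dw tw : Int) :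
    evaluate_decryption_alt t dw tw
      = dw * hitCount t.toList commonDigraphs 2 + tw * hitCount t.toList commonTrigrams 3 := by
  simp only [evaluate_decryption_alt]
  have hbody : (fun (score i : Int) =>
      let score' := if PySem.Set.contains commonDigraphSet
          (PySem.List.slice t.toList (some i) (some (i + 2))) then score + dw else score
      if PySem.Set.contains commonTrigramSet
          (PySem.List.slice t.toList (some i) (some (i + 3))) then score' + tw else score')
    = (fun (score i : Int) => score +
        ((if decide (PySem.List.slice t.toList (some i) (some (i + 2)) ∈ commonDigraphs)
          then dw else 0)
        + (if decide (PySem.List.slice t.toList (some i) (some (i + 3)) ∈ commonTrigrams)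
          then tw else 0))) := by
    funext score i
    rw [contains_dig, contains_tri]
    split_ifs <;> ring
  rw [hbody, PySem.List.foldl_add, zero_add]
  have hsplit : ((PySem.List.pyRange 0 (t.toList.length : Int) 1).map (fun i =>
        (if decide (PySem.List.slice t.toList (some i) (some (i + 2)) ∈ commonDigraphs)
          then dw else 0)
        + (if decide (PySem.List.slice t.toList (some i) (some (i + 3)) ∈ commonTrigrams)
          then tw else 0))).sum
      = ((PySem.List.pyRange 0 (t.toList.length : Int) 1).map (fun i =>
          if decide (PySem.List.slice t.toList (some i) (some (i + 2)) ∈ commonDigraphs)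
          then dw else 0)).sum
        + ((PySem.List.pyRange 0 (t.toList.length : Int) 1).map (fun i =>
          if decide (PySem.List.slice t.toList (some i) (some (i + 3)) ∈ commonTrigrams)
          then tw else 0)).sum := PySem.List.sum_map_add_int ..
  rw [hsplit, sum_map_ite_w, sum_map_ite_w]
  unfold hitCount
  rfl

-- ===== VERDICT (by name: the statement is the Claim_ definition above) =====
theorem evaluate_decryption_spec : Claim_equal_evaluate_decryption := by
  intro t dw tw _
  unfold Spec_evaluate_decryption
  rw [a_eq, b_eq]
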